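-- pv_equiv track=rewrite | github.com/mikaelbeat/Modern_Python3_Bootcamp | Modern_Python3_Bootcamp/Iterators_and_generators/Make_song_exercise.py | make_song
-- ===== SOURCE A (Python) =====
-- def make_song(verses=99, beverage="soda"):
--
--     while verses >= 0:
--         if verses >= 2:
--             yield f"{verses} bottles of {beverage} on the wall."
--         elif verses == 1:
--             yield f"Only one bottle of {beverage} left!"
--         else:
--             yield f"No more {beverage} left!"
--         verses -= 1
-- ===== SOURCE B (Python) =====
-- def _line(v, beverage):
--     if v == 0:
--         return f"No more {beverage} left!"
--     elif v == 1:
--         return f"Only one bottle of {beverage} left!"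
--     else:
--         return f"{v} bottles of {beverage} on the wall."
--
-- def make_song(verses=99, beverage="soda"):
--     # Build the song bottom-up (from the last line to the first) into an
--     # accumulator, then emit it reversed.
--     song = []
--     for v in range(0, verses + 1):
--         song.append(_line(v, beverage))
--     yield from reversed(song)
-- ===== Notes on version B (the rewrite author's own statement) =====
-- stated objective: alternative
-- what changed: Instead of A's countdown while-loop that yields each line directly, B builds the song back-to-front: it accumulates the lines ascending from verse 0 via a separate line function and then yields the accumulated list reversed.
import Mathlib
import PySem

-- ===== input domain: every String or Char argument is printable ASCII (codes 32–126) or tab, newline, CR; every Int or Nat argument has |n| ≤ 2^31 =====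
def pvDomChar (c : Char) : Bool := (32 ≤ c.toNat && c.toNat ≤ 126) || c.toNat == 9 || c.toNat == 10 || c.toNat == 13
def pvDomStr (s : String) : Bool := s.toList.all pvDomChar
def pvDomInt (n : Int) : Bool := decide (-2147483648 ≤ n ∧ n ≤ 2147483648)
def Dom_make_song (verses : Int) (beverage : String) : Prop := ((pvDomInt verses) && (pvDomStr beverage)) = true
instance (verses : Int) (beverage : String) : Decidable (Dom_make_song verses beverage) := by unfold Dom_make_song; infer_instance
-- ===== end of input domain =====

-- B builds the song back-to-front: accumulates lines ascending from verse 0 and emits the list reversed (alternative construction; A counts down yielding directly).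


-- ===== PORT A =====
-- literal port of A: while verses >= 0 { yield one of three lines (elif chain); verses -= 1 }
def make_song (verses : Int) (beverage : String) : List String :=
  if 0 ≤ verses then
    (if 2 ≤ verses then PySem.Int.toStr verses ++ " bottles of " ++ beverage ++ " on the wall."
     else if verses = 1 then "Only one bottle of " ++ beverage ++ " left!"
     else "No more " ++ beverage ++ " left!")
    :: make_song (verses - 1) beverage
  else []
termination_by (verses + 1).toNat
decreasing_by omega

-- ===== PORT B =====
-- port of Source B's _line helper
def pvLine (v : Int) (beverage : String) : String :=
  if v = 0 then "No more " ++ beverage ++ " left!"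
  else if v = 1 then "Only one bottle of " ++ beverage ++ " left!"
  else PySem.Int.toStr v ++ " bottles of " ++ beverage ++ " on the wall."

-- literal port of B: append lines for v in range(0, verses+1) into an accumulator, then reverse
def make_song_alt (verses : Int) (beverage : String) : List String :=
  ((PySem.List.pyRange 0 (verses + 1) 1).foldl
    (fun song v => song ++ [pvLine v beverage]) []).reverse

-- ===== PRECONDITION & SPEC =====
def Spec_make_song (verses : Int) (beverage : String) (out : List String) : Prop := out = make_song_alt verses beverage
instance (verses : Int) (beverage : String) (out : List String) : Decidable (Spec_make_song verses beverage out) := by unfold Spec_make_song; infer_instance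

-- ===== CLAIM (what is proved, stated in full; the proofs are below) =====
def Claim_equal_make_song : Prop := ∀ (verses : Int) (beverage : String), Dom_make_song verses beverage → Spec_make_song verses beverage (make_song verses beverage)

-- ===== LEMMAS AND PROOFS =====
theorem pvFoldl_append_map {α : Type} (f : α → String) :
    ∀ (xs : List α) (acc : List String),
      xs.foldl (fun song v => song ++ [f v]) acc = acc ++ xs.map f := by
  intro xs
  induction xs with
  | nil => simp
  | cons x t ih => intro acc; simp [List.foldl_cons, ih]

theorem make_song_alt_eq (verses : Int) (beverage : String) :
    make_song_alt verses beverage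
      = ((PySem.List.pyRange 0 (verses + 1) 1).map (fun v => pvLine v beverage)).reverse := by
  unfold make_song_alt
  rw [pvFoldl_append_map]
  simp

theorem make_song_eq_alt : ∀ (n : Nat) (verses : Int), (verses + 1).toNat ≤ n →
    ∀ (beverage : String), make_song verses beverage = make_song_alt verses beverage := by
  intro n
  induction n with
  | zero =>
    intro v hv b
    have hneg : ¬ 0 ≤ v := by omega
    rw [make_song, make_song_alt_eq,
      PySem.List.pyRange_one_eq_nil (by omega : v + 1 ≤ 0)]
    simp [hneg]
  | succ n ih =>
    intro v hv b
    by_cases h0 : 0 ≤ v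
    · rw [make_song, if_pos h0, ih (v - 1) (by omega) b,
        make_song_alt_eq, make_song_alt_eq,
        PySem.List.pyRange_one_succ_right (by omega : (0:Int) ≤ v)]
      have : v - 1 + 1 = v := by omega
      rw [this]
      simp only [List.map_append, List.map_cons, List.map_nil, List.reverse_append,
        List.reverse_cons, List.reverse_nil, List.nil_append, List.cons_append]
      congr 1
      · -- A's elif chain agrees with B's line function on v ≥ 0
        unfold pvLine
        by_cases h2 : 2 ≤ v
        · rw [if_pos h2, if_neg (by omega : ¬ v = 0), if_neg (by omega : ¬ v = 1)]
        · by_cases h1 : v = 1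
          · subst h1; simp
          · have : v = 0 := by omega
            subst this; simp
    · rw [make_song, make_song_alt_eq,
        PySem.List.pyRange_one_eq_nil (by omega : v + 1 ≤ 0)]
      simp [h0]

-- ===== VERDICT (by name: the statement is the Claim_ definition above) =====
theorem make_song_spec : Claim_equal_make_song := by
  intro v b _
  unfold Spec_make_song
  exact make_song_eq_alt (v + 1).toNat v le_rfl b
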